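-- pv_equiv track=rewrite | github.com/HawkSP/charliXCX | train.py | create_theme_matrix
-- ===== SOURCE A (Python) =====
-- def create_theme_matrix(theme_list):
--     theme_matrix = {}
--
--     # Count the number of themes in the list
--     theme_count = len(theme_list)
--
--     # Generate the segment size
--     total_combinations = 10000
--     segment_size = total_combinations // theme_count
--     remaining_combinations = total_combinations % theme_count
--
--     # Assign the 4-digit number ranges to themes
--     start = 0
--     for i, theme in enumerate(theme_list):
--         end = start + segment_size - 1
--         if remaining_combinations > 0:
--             end += 1
--             remaining_combinations -= 1
--         theme_matrix[(start, end)] = theme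
--         start = end + 1
--
--     return theme_matrix
-- ===== SOURCE B (Python) =====
-- def create_theme_matrix(theme_list):
--     theme_count = len(theme_list)
--     segment_size, remaining = divmod(10000, theme_count)
--     theme_matrix = {}
--     for i, theme in enumerate(theme_list):
--         start = i * segment_size + min(i, remaining)
--         end = start + segment_size + (1 if i < remaining else 0) - 1
--         theme_matrix[(start, end)] = theme
--     return theme_matrix
-- ===== Notes on version B (the rewrite author's own statement) =====
-- stated objective: alternative
-- what changed: B computes each segment's start and end by a closed-form index formula (start = i*segment_size + min(i, remaining)) instead of threading a running start and decrementing the remainder across iterations.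
import Mathlib
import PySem

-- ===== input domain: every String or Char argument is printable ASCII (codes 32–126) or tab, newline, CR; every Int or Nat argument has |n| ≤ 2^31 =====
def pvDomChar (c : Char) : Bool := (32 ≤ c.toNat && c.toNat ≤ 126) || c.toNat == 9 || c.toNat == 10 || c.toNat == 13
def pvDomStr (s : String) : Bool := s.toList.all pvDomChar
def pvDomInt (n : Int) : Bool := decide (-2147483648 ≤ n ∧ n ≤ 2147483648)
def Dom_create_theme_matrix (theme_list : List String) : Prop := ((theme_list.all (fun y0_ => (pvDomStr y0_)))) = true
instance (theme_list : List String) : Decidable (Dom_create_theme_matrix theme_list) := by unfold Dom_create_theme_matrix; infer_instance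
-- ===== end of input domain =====

-- B replaces A's threaded running `start`/decremented remainder by a closed-form per-index
-- start formula (objective: alternative decomposition, same O(n) cost).

-- ===== PORT A =====
-- A's loop body: state (theme_matrix, start, remaining_combinations)
def ctmStepA (seg : Int) (st : PySem.Dict (Int × Int) String × Int × Int) (theme : String) :
    PySem.Dict (Int × Int) String × Int × Int :=
  let d := st.1
  let start := st.2.1
  let rem := st.2.2
  let e := start + seg - 1
  if rem > 0 then (d.insert (start, e + 1) theme, e + 2, rem - 1)
  else (d.insert (start, e) theme, e + 1, rem)

def create_theme_matrix (theme_list : List String) : List (Int × Int × String) :=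
  -- segment_size = 10000 // len, remaining = 10000 % len, then A's loop threading (dict, start, remaining)
  ((theme_list.foldl (ctmStepA (PySem.Int.floordiv 10000 (theme_list.length : Int)))
      (PySem.Dict.empty, 0, PySem.Int.mod 10000 (theme_list.length : Int))).1.items).map
    (fun p => (p.1.1, p.1.2, p.2))

-- ===== PORT B =====
-- B's loop body over enumerate(theme_list): closed-form start/end from the index
def ctmStepB (seg rem : Int) (d : PySem.Dict (Int × Int) String) (p : Int × String) :
    PySem.Dict (Int × Int) String :=
  let start := p.1 * seg + min p.1 rem
  let e := start + seg + (if p.1 < rem then 1 else 0) - 1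
  d.insert (start, e) p.2

def create_theme_matrix_alt (theme_list : List String) : List (Int × Int × String) :=
  -- B: one pass over enumerate(theme_list) with the closed-form start/end per index
  (((PySem.List.enumerate theme_list 0).foldl
      (ctmStepB (PySem.Int.floordiv 10000 (theme_list.length : Int))
                (PySem.Int.mod 10000 (theme_list.length : Int)))
      PySem.Dict.empty).items).map (fun p => (p.1.1, p.1.2, p.2))

-- ===== PRECONDITION & SPEC =====
-- Pre_ excludes only the empty list, on which A raises ZeroDivisionError (10000 // 0).
def Pre_create_theme_matrix (theme_list : List String) : Prop := theme_list ≠ []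
instance (theme_list : List String) : Decidable (Pre_create_theme_matrix theme_list) := by
  unfold Pre_create_theme_matrix; infer_instance

def pvWitness_create_theme_matrix : List String := ["love", "party", "night"]

def Spec_create_theme_matrix (theme_list : List String) (out : List (Int × Int × String)) : Prop := out = create_theme_matrix_alt theme_list
instance (theme_list : List String) (out : List (Int × Int × String)) : Decidable (Spec_create_theme_matrix theme_list out) := by unfold Spec_create_theme_matrix; infer_instance

-- ===== CLAIM (what is proved, stated in full; the proofs are below) =====
def Claim_equal_create_theme_matrix : Prop := ∀ (theme_list : List String), Dom_create_theme_matrix theme_list → Pre_create_theme_matrix theme_list → Spec_create_theme_matrix theme_list (create_theme_matrix theme_list)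

-- ===== LEMMAS AND PROOFS =====

-- Loop invariant: after processing k items, A's running start is k*seg + min k rem0 and its
-- remaining counter is rem0 - min k rem0; from that state both folds build the same dict.
lemma ctm_fold_eq (seg rem0 : Int) :
    ∀ (l : List String) (k : Int), 0 ≤ k →
      ∀ (d : PySem.Dict (Int × Int) String),
      (l.foldl (ctmStepA seg) (d, k * seg + min k rem0, rem0 - min k rem0)).1
        = (PySem.List.enumerate l k).foldl (ctmStepB seg rem0) d := by
  intro l
  induction l with
  | nil => intro k hk d; simp [PySem.List.enumerate_nil]
  | cons x xs ih =>
    intro k hk d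
    rw [PySem.List.enumerate_cons]
    simp only [List.foldl_cons]
    by_cases hlt : k < rem0
    · have h1 : min k rem0 = k := by omega
      have h2 : min (k + 1) rem0 = k + 1 := by omega
      have hA : ctmStepA seg (d, k * seg + min k rem0, rem0 - min k rem0) x
          = (ctmStepB seg rem0 d (k, x), (k + 1) * seg + min (k + 1) rem0,
             rem0 - min (k + 1) rem0) := by
        simp only [ctmStepA, ctmStepB, h1, h2]
        rw [if_pos (by omega), if_pos hlt]
        refine Prod.ext ?_ (Prod.ext ?_ ?_) <;> simp <;> ring_nf
      rw [hA, ih (k + 1) (by omega)]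
    · have h1 : min k rem0 = rem0 := by omega
      have h2 : min (k + 1) rem0 = rem0 := by omega
      have hA : ctmStepA seg (d, k * seg + min k rem0, rem0 - min k rem0) x
          = (ctmStepB seg rem0 d (k, x), (k + 1) * seg + min (k + 1) rem0,
             rem0 - min (k + 1) rem0) := by
        simp only [ctmStepA, ctmStepB, h1, h2]
        rw [if_neg (by omega), if_neg hlt]
        refine Prod.ext ?_ (Prod.ext ?_ ?_) <;> simp <;> ring_nf
      rw [hA, ih (k + 1) (by omega)]

-- ===== VERDICT (by name: the statement is the Claim_ definition above) =====
theorem create_theme_matrix_spec : Claim_equal_create_theme_matrix := by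
  intro theme_list _hdom hpre
  unfold Spec_create_theme_matrix create_theme_matrix create_theme_matrix_alt
  have hn : 0 < (theme_list.length : Int) := by
    cases theme_list with
    | nil => exact absurd rfl hpre
    | cons x xs => simp
  have hrem : 0 ≤ PySem.Int.mod 10000 (theme_list.length : Int) :=
    PySem.Int.mod_nonneg _ hn
  have := ctm_fold_eq (PySem.Int.floordiv 10000 (theme_list.length : Int))
      (PySem.Int.mod 10000 (theme_list.length : Int)) theme_list 0 le_rfl
      PySem.Dict.empty
  have hmin : min (0:Int) (PySem.Int.mod 10000 (theme_list.length : Int)) = 0 := by omega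
  rw [hmin] at this
  simp only [zero_mul, add_zero, sub_zero] at this
  rw [this]
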